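-- pv_equiv track=rewrite | github.com/Sang-Buster/AeroLex-Tuner | pre_proc/Step2_llm.py | parse_atc_blocks
-- ===== SOURCE A (Python) =====
-- from typing import Dict, List, Optional
--
-- def parse_atc_blocks(content: str) -> List[Dict]:
--     """Parse the entire content into a list of message blocks."""
--     lines = content.splitlines()
--     blocks = []
--     current_block_lines = []
--     for line in lines:
--         if line.strip() == "":
--             # Skip empty lines
--             continue
--         if line.startswith("{") and current_block_lines:
--             # Start of a new block; save the previous one
--             blocks.append("\n".join(current_block_lines))
--             current_block_lines = [line]
--         else:
--             current_block_lines.append(line)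
--     if current_block_lines:
--         blocks.append("\n".join(current_block_lines))
--     return blocks
-- ===== SOURCE B (Python) =====
-- def parse_atc_blocks(content):
--     """Parse the entire content into a list of message blocks (index-then-slice)."""
--     clean = [l for l in content.splitlines() if l.strip() != ""]
--     starts = [i for i, l in enumerate(clean) if l.startswith("{")]
--     bounds = ([0] if clean and (not starts or starts[0] != 0) else []) + starts
--     return ["\n".join(clean[b:e]) for b, e in zip(bounds, bounds[1:] + [len(clean)])]
-- ===== Notes on version B (the rewrite author's own statement) =====
-- stated objective: alternative
-- what changed: Replaces A's single-pass running accumulator (current_block_lines flushed at each '{') by an index-then-slice decomposition: filter out blank lines, collect the '{' boundary indices, and assemble each block by slicing the cleaned lines between consecutive boundaries.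
import Mathlib
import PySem

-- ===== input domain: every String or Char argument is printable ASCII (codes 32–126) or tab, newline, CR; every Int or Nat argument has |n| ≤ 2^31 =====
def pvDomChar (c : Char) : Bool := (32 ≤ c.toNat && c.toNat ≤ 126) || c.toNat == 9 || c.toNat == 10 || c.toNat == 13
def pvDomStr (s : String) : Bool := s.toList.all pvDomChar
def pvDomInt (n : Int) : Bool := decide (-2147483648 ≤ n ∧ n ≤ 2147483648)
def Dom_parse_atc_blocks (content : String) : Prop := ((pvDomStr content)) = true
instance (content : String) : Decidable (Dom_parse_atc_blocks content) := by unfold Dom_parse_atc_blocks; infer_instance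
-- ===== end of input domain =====

-- B replaces A's running-accumulator scan by an index-then-slice decomposition
-- (find the '{' boundaries, then cut the filtered lines between them); objective: alternative.

-- ===== PORT A =====
-- loop body of A's for-loop: state = (blocks, current_block_lines)
def pvStepA (st : List String × List String) (line : String) : List String × List String :=
  if PySem.Str.strip line = "" then st
  else if PySem.Str.startswith line "{" && !st.2.isEmpty then
    (st.1 ++ [PySem.Str.join "\n" st.2], [line])
  else (st.1, st.2 ++ [line])

def parse_atc_blocks (content : String) : List String :=
  let lines := PySem.Str.splitlines content
  let r := lines.foldl pvStepA ([], [])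
  if !r.2.isEmpty then r.1 ++ [PySem.Str.join "\n" r.2] else r.1

-- ===== PORT B =====
-- Source B's final list comprehension: ["\n".join(clean[b:e]) for b, e in zip(bounds, bounds[1:] + [len(clean)])]
def pvSegs (clean : List String) (bounds : List Int) : List String :=
  ((bounds.zip (bounds.drop 1 ++ [(clean.length : Int)])).map
    (fun p => PySem.Str.join "\n" (PySem.List.slice clean (some p.1) (some p.2))))

def parse_atc_blocks_alt (content : String) : List String :=
  let clean := (PySem.Str.splitlines content).filter (fun l => PySem.Str.strip l != "")
  let starts := ((PySem.List.enumerate clean).filter (fun p => PySem.Str.startswith p.2 "{")).map (fun p => p.1)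
  let bounds := (if clean ≠ [] ∧ (starts = [] ∨ starts.head? ≠ some 0) then [0] else []) ++ starts
  pvSegs clean bounds

-- ===== PRECONDITION & SPEC =====
def Spec_parse_atc_blocks (content : String) (out : List String) : Prop := out = parse_atc_blocks_alt content
instance (content : String) (out : List String) : Decidable (Spec_parse_atc_blocks content out) := by unfold Spec_parse_atc_blocks; infer_instance

-- ===== CLAIM (what is proved, stated in full; the proofs are below) =====
def Claim_equal_parse_atc_blocks : Prop := ∀ (content : String), Dom_parse_atc_blocks content → Spec_parse_atc_blocks content (parse_atc_blocks content)

-- ===== LEMMAS AND PROOFS =====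

-- reference characterisation: blocks of a cleaned line list, given a non-empty current block
def pvBw (cur : List String) : List String → List String
  | [] => [PySem.Str.join "\n" cur]
  | l :: ls =>
    if PySem.Str.startswith l "{" then PySem.Str.join "\n" cur :: pvBw [l] ls
    else pvBw (cur ++ [l]) ls

def pvSpecFn (clean : List String) : List String :=
  match clean with
  | [] => []
  | c :: cs => pvBw [c] cs

-- A-side --------------------------------------------------------------------

def pvStepG (st : List String × List String) (line : String) : List String × List String :=
  if PySem.Str.startswith line "{" && !st.2.isEmpty then
    (st.1 ++ [PySem.Str.join "\n" st.2], [line])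
  else (st.1, st.2 ++ [line])

def pvFinish (st : List String × List String) : List String :=
  if !st.2.isEmpty then st.1 ++ [PySem.Str.join "\n" st.2] else st.1

lemma foldl_stepA_filter (lines : List String) (st : List String × List String) :
    lines.foldl pvStepA st = (lines.filter (fun l => PySem.Str.strip l != "")).foldl pvStepG st := by
  induction lines generalizing st with
  | nil => rfl
  | cons l ls ih =>
    by_cases h : PySem.Str.strip l = ""
    · simp [h, pvStepA, ih]
    · simp [h, pvStepA, pvStepG, ih]

lemma foldG_bw (cs : List String) (cur blocks : List String) (h : cur ≠ []) :
    pvFinish (cs.foldl pvStepG (blocks, cur)) = blocks ++ pvBw cur cs := by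
  induction cs generalizing cur blocks with
  | nil => simp [pvFinish, pvBw, h]
  | cons l ls ih =>
    have hcur : (!cur.isEmpty) = true := by simp [h]
    by_cases hs : PySem.Str.startswith l "{" = true
    · have hs' : PySem.Chars.startswith l.toList ['{'] = true := by simpa using hs
      have hstep : pvStepG (blocks, cur) l = (blocks ++ [PySem.Str.join "\n" cur], [l]) := by
        simp [pvStepG, hs', hcur]
      rw [List.foldl_cons, hstep, ih [l] _ (by simp)]
      simp [pvBw, hs']
    · have hs' : PySem.Chars.startswith l.toList ['{'] = false := by
        simpa using hs
      have hstep : pvStepG (blocks, cur) l = (blocks, cur ++ [l]) := by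
        simp [pvStepG, hs']
      rw [List.foldl_cons, hstep, ih (cur ++ [l]) _ (by simp)]
      simp [pvBw, hs']

lemma A_core (lines : List String) :
    pvFinish (lines.foldl pvStepA ([], [])) =
      pvSpecFn (lines.filter (fun l => PySem.Str.strip l != "")) := by
  rw [foldl_stepA_filter]
  cases h : lines.filter (fun l => PySem.Str.strip l != "") with
  | nil => simp [pvSpecFn, pvFinish]
  | cons c cs =>
    have hc : pvStepG ([], []) c = ([], [c]) := by simp [pvStepG]
    rw [List.foldl_cons, hc, foldG_bw cs [c] [] (by simp)]
    simp [pvSpecFn]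

lemma A_eq (content : String) :
    parse_atc_blocks content =
      pvSpecFn ((PySem.Str.splitlines content).filter (fun l => PySem.Str.strip l != "")) := by
  exact A_core (PySem.Str.splitlines content)

-- B-side --------------------------------------------------------------------

-- the 'starts' index list of Source B, with an explicit enumerate start
def pvS (cs : List String) (s : Int) : List Int :=
  ((PySem.List.enumerate cs s).filter (fun p => PySem.Str.startswith p.2 "{")).map (fun p => p.1)

lemma enumerate_shift {α : Type} (xs : List α) (s t : Int) :
    PySem.List.enumerate xs (s + t) = (PySem.List.enumerate xs s).map (fun p => (p.1 + t, p.2)) := by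
  induction xs generalizing s with
  | nil => simp [PySem.List.enumerate_nil]
  | cons x xs ih =>
    rw [PySem.List.enumerate_cons, PySem.List.enumerate_cons, List.map_cons]
    have : s + t + 1 = (s + 1) + t := by ring
    rw [this, ih]

lemma pvS_shift (cs : List String) (s t : Int) :
    pvS cs (s + t) = (pvS cs s).map (fun b => b + t) := by
  unfold pvS
  rw [enumerate_shift, List.filter_map, List.map_map, List.map_map]
  rfl

lemma pvS_cons (l : String) (ls : List String) (s : Int) :
    pvS (l :: ls) s = (if PySem.Str.startswith l "{" then [s] else []) ++ pvS ls (s + 1) := by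
  unfold pvS
  rw [PySem.List.enumerate_cons, List.filter_cons]
  split <;> simp_all

lemma pvS_ge (cs : List String) (s : Int) : ∀ x ∈ pvS cs s, s ≤ x := by
  intro x hx
  unfold pvS at hx
  obtain ⟨p, hp, rfl⟩ := List.mem_map.mp hx
  have hp' := List.mem_of_mem_filter hp
  obtain ⟨k, hk, rfl⟩ := (PySem.List.mem_enumerate_iff _ _ _).mp hp'
  omega

lemma slice_shift (pre xs : List String) (b e : Int) (hb : 0 ≤ b) (he : 0 ≤ e) :
    PySem.List.slice (pre ++ xs) (some (b + (pre.length : Int))) (some (e + (pre.length : Int))) =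
      PySem.List.slice xs (some b) (some e) := by
  obtain ⟨bn, rfl⟩ := Int.eq_ofNat_of_zero_le hb
  obtain ⟨en, rfl⟩ := Int.eq_ofNat_of_zero_le he
  have h1 : ((bn : Int) + (pre.length : Int)) = ((bn + pre.length : Nat) : Int) := by push_cast; ring
  have h2 : ((en : Int) + (pre.length : Int)) = ((en + pre.length : Nat) : Int) := by push_cast; ring
  rw [h1, h2, PySem.List.slice_natCast, PySem.List.slice_natCast]
  have hd : (pre ++ xs).drop (bn + pre.length) = xs.drop bn := by
    rw [List.drop_append, List.drop_eq_nil_of_le (by omega), List.nil_append]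
    congr 1
    omega
  rw [hd]
  congr 1
  omega

lemma slice_prefix (pre xs : List String) :
    PySem.List.slice (pre ++ xs) (some 0) (some (pre.length : Int)) = pre := by
  rw [PySem.List.slice_zero_start, PySem.List.slice_to_natCast]
  exact List.take_left

lemma segs_bw (cs : List String) (cur : List String) (h : cur ≠ []) :
    pvSegs (cur ++ cs) (0 :: pvS cs (cur.length : Int)) = pvBw cur cs := by
  induction cs generalizing cur with
  | nil =>
    unfold pvSegs pvBw
    simp only [pvS, PySem.List.enumerate_nil, List.filter_nil, List.map_nil, List.append_nil,
      List.drop_succ_cons, List.drop_nil, List.nil_append, List.zip_cons_cons, List.zip_nil_left,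
      List.map_cons, List.map_nil]
    rw [PySem.List.slice_zero_start, PySem.List.slice_to_natCast]
    simp
  | cons l ls ih =>
    rw [pvS_cons]
    by_cases hs : PySem.Str.startswith l "{" = true
    · have hs' : PySem.Chars.startswith l.toList ['{'] = true := by simpa using hs
      rw [if_pos hs, List.singleton_append]
      have hshift : pvS ls ((cur.length : Int) + 1) = (pvS ls 1).map (fun b => b + (cur.length : Int)) := by
        rw [show ((cur.length : Int) + 1) = 1 + (cur.length : Int) by ring, pvS_shift]
      rw [hshift]
      unfold pvSegs
      simp only [List.drop_succ_cons, List.drop_zero, List.cons_append, List.zip_cons_cons,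
        List.map_cons]
      rw [slice_prefix cur (l :: ls)]
      have hk : ((cur.length : Int) :: (pvS ls 1).map (fun b => b + (cur.length : Int)))
          = (((0 : Int) :: pvS ls 1)).map (fun b => b + (cur.length : Int)) := by simp
      have hlen : ((cur ++ l :: ls).length : Int) = (((l :: ls).length : Nat) : Int) + (cur.length : Int) := by
        push_cast [List.length_append]
        ring
      have htl : ((pvS ls 1).map (fun b => b + (cur.length : Int))) ++ [((cur ++ l :: ls).length : Int)]
          = ((pvS ls 1) ++ [(((l :: ls).length : Nat) : Int)]).map (fun b => b + (cur.length : Int)) := by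
        rw [hlen]
        simp
      rw [hk, htl, List.zip_map, List.map_map]
      have hmap : ∀ p ∈ (((0 : Int) :: pvS ls 1)).zip ((pvS ls 1) ++ [(((l :: ls).length : Nat) : Int)]),
          ((fun p : Int × Int => PySem.Str.join "\n" (PySem.List.slice (cur ++ l :: ls) (some p.1) (some p.2))) ∘
            Prod.map (fun b => b + (cur.length : Int)) (fun b => b + (cur.length : Int))) p
          = (fun p : Int × Int => PySem.Str.join "\n" (PySem.List.slice (l :: ls) (some p.1) (some p.2))) p := by
        intro p hp
        obtain ⟨h1, h2⟩ := List.of_mem_zip hp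
        have hb : 0 ≤ p.1 := by
          rcases List.mem_cons.mp h1 with h | h
          · omega
          · have := pvS_ge ls 1 _ h; omega
        have he : 0 ≤ p.2 := by
          rcases List.mem_append.mp h2 with h | h
          · have := pvS_ge ls 1 _ h; omega
          · simp only [List.mem_singleton] at h
            rw [h]
            positivity
        simp only [Function.comp_apply, Prod.map]
        rw [slice_shift cur (l :: ls) p.1 p.2 hb he]
      rw [List.map_congr_left hmap]
      have hrec : pvSegs (l :: ls) (0 :: pvS ls 1)
          = ((((0 : Int) :: pvS ls 1)).zip ((pvS ls 1) ++ [(((l :: ls).length : Nat) : Int)])).map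
              (fun p : Int × Int => PySem.Str.join "\n" (PySem.List.slice (l :: ls) (some p.1) (some p.2))) := by
        unfold pvSegs
        simp only [List.drop_succ_cons, List.drop_zero]
      have hih : pvSegs (l :: ls) (0 :: pvS ls 1) = pvBw [l] ls := by
        have := ih [l] (by simp)
        simpa using this
      rw [← hrec, hih]
      simp [pvBw, hs']
    · have hs' : PySem.Chars.startswith l.toList ['{'] = false := by simpa using hs
      rw [if_neg hs, List.nil_append]
      rw [show (cur ++ l :: ls) = (cur ++ [l]) ++ ls by simp,
        show ((cur.length : Int) + 1) = (((cur ++ [l]).length : Nat) : Int) by push_cast [List.length_append, List.length_singleton]; omega,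
        ih (cur ++ [l]) (by simp)]
      simp [pvBw, hs']

lemma B_core (clean : List String) :
    pvSegs clean
        ((if clean ≠ [] ∧ (pvS clean 0 = [] ∨ (pvS clean 0).head? ≠ some 0) then [0] else [])
          ++ pvS clean 0) = pvSpecFn clean := by
  cases clean with
  | nil => simp [pvS, pvSegs, pvSpecFn, PySem.List.enumerate_nil]
  | cons c cs =>
    rw [pvS_cons]
    by_cases hc : PySem.Str.startswith c "{" = true
    · rw [if_pos hc, List.singleton_append]
      rw [if_neg (by simp)]
      rw [List.nil_append,
        show ((0 : Int) + 1) = ((([c] : List String).length : Nat) : Int) by simp,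
        show (c :: cs : List String) = [c] ++ cs by simp,
        segs_bw cs [c] (by simp)]
      simp [pvSpecFn]
    · rw [if_neg hc, List.nil_append]
      have hge := pvS_ge cs (0 + 1)
      rw [if_pos ?side]
      case side =>
        refine ⟨by simp, ?_⟩
        cases hps : pvS cs (0 + 1) with
        | nil => exact Or.inl rfl
        | cons b bs =>
          refine Or.inr ?_
          have hb := hge b (by rw [hps]; simp)
          simp only [List.head?_cons]
          intro hcontra
          have : b = 0 := by injection hcontra
          omega
      rw [show ((0 : Int) + 1) = ((([c] : List String).length : Nat) : Int) by simp] at *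
      rw [show (([0] : List Int) ++ pvS cs ((([c] : List String).length : Nat) : Int))
            = 0 :: pvS cs ((([c] : List String).length : Nat) : Int) by simp,
        show (c :: cs : List String) = [c] ++ cs by simp,
        segs_bw cs [c] (by simp)]
      simp [pvSpecFn]

lemma B_eq (content : String) :
    parse_atc_blocks_alt content =
      pvSpecFn ((PySem.Str.splitlines content).filter (fun l => PySem.Str.strip l != "")) := by
  exact B_core ((PySem.Str.splitlines content).filter (fun l => PySem.Str.strip l != ""))

-- ===== VERDICT (by name: the statement is the Claim_ definition above) =====
theorem parse_atc_blocks_spec : Claim_equal_parse_atc_blocks := by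
  intro content _
  unfold Spec_parse_atc_blocks
  rw [A_eq, B_eq]
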